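-- pv_equiv track=rewrite | github.com/Kekniskd/datastuctures-and-algotithms | Easy/Array/alternative_Subsequence.py | alternativeSequence
-- ===== SOURCE A (Python) =====
-- def alternativeSequence(array: list) -> int:
--     if len(array) == 0:
--         return 0
--
--     currLen = 1
--     maxLen = 0
--
--     for idx in range(1, len(array)):
--         if array[idx] != array[idx - 1]:
--             currLen += 1
--         else:
--             maxLen = max(maxLen, currLen)
--             currLen = 1
--
--     maxLen = max(maxLen, currLen)
--     return maxLen
-- ===== SOURCE B (Python) =====
-- def alternativeSequence(array: list) -> int:
--     n = len(array)
--     cuts = [0]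
--     for i in range(1, n):
--         if array[i] == array[i - 1]:
--             cuts.append(i)
--     cuts.append(n)
--     best = 0
--     for left, right in zip(cuts, cuts[1:]):
--         gap = right - left
--         if gap > best:
--             best = gap
--     return best
-- ===== Notes on version B (the rewrite author's own statement) =====
-- stated objective: alternative
-- what changed: Replaces the running-counter/max accumulation with a build-boundaries-then-measure strategy: collect the break positions (where adjacent elements are equal) into a cuts list with 0 and n as sentinels, then take the largest gap between consecutive cuts; the sentinels also remove A's empty-array guard.
import Mathlib
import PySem

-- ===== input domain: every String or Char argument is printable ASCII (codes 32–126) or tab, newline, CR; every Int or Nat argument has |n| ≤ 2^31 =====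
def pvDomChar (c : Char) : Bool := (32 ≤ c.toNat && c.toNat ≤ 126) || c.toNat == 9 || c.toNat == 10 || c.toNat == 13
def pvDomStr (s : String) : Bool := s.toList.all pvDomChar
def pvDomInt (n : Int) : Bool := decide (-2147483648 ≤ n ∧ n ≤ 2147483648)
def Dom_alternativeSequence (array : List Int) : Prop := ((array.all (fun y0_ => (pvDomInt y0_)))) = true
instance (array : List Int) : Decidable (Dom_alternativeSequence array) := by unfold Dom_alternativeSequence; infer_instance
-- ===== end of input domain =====

-- B replaces A's running-counter scan with a cuts-list-plus-gap-measure decomposition (alternative, same cost).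

-- ===== PORT A =====
-- literal port of A: running currLen/maxLen over range(1, len(array)); array[idx] is always
-- in range here, so pyGetD is exact
def alternativeSequence (array : List Int) : Int :=
  if array.length = 0 then 0
  else
    let s := (PySem.List.pyRange 1 (array.length : Int) 1).foldl
      (fun (s : Int × Int) idx =>
        if PySem.List.pyGetD array idx 0 ≠ PySem.List.pyGetD array (idx - 1) 0 then
          (s.1 + 1, s.2)
        else
          (1, max s.2 s.1))
      (1, 0)
    max s.2 s.1

-- ===== PORT B =====
-- literal port of Source B: build the cuts list (break positions with sentinels 0 and n),
-- then take the largest gap between consecutive cuts; cuts[1:] = cuts.tail; indices in range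
def alternativeSequence_alt (array : List Int) : Int :=
  let n : Int := array.length
  let cuts := (PySem.List.pyRange 1 n 1).foldl
    (fun (acc : List Int) i =>
      if PySem.List.pyGetD array i 0 = PySem.List.pyGetD array (i - 1) 0 then acc ++ [i] else acc)
    [0]
  let cuts := cuts ++ [n]
  (cuts.zip cuts.tail).foldl
    (fun (best : Int) p => if p.2 - p.1 > best then p.2 - p.1 else best) 0

-- ===== PRECONDITION & SPEC =====
def Spec_alternativeSequence (array : List Int) (out : Int) : Prop := out = alternativeSequence_alt array
instance (array : List Int) (out : Int) : Decidable (Spec_alternativeSequence array out) := by unfold Spec_alternativeSequence; infer_instance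

-- ===== CLAIM (what is proved, stated in full; the proofs are below) =====
def Claim_equal_alternativeSequence : Prop := ∀ (array : List Int), Dom_alternativeSequence array → Spec_alternativeSequence array (alternativeSequence array)

-- ===== LEMMAS AND PROOFS =====

-- adjacent pairs of a list (proof-side view of cuts.zip cuts.tail)
def pvZipAdj (xs : List Int) : List (Int × Int) := xs.zip xs.tail

-- B's gap-maximising fold
def pvGmax (xs : List Int) : Int :=
  (pvZipAdj xs).foldl (fun (best : Int) p => if p.2 - p.1 > best then p.2 - p.1 else best) 0

theorem pvZipAdj_append_singleton (xs : List Int) (h : xs ≠ []) (y : Int) :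
    pvZipAdj (xs ++ [y]) = pvZipAdj xs ++ [(xs.getLastD 0, y)] := by
  induction xs with
  | nil => exact absurd rfl h
  | cons a t ih =>
    cases t with
    | nil => simp [pvZipAdj]
    | cons b u =>
      have := ih (by simp)
      simp only [pvZipAdj] at this ⊢
      simp_all [List.getLastD]

theorem pvGmax_append (xs : List Int) (h : xs ≠ []) (y : Int) :
    pvGmax (xs ++ [y]) = max (pvGmax xs) (y - xs.getLastD 0) := by
  unfold pvGmax
  rw [pvZipAdj_append_singleton xs h y, List.foldl_append]
  simp only [List.foldl]
  rcases le_or_gt (y - xs.getLastD 0) ((pvZipAdj xs).foldl (fun best p => if p.2 - p.1 > best then p.2 - p.1 else best) 0) with hle | hgt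
  · rw [if_neg (by omega), max_eq_left hle]
  · rw [if_pos (by omega), max_eq_right (le_of_lt hgt)]

-- the two loop bodies
def pvFA (array : List Int) : Int × Int → Int → Int × Int :=
  fun s idx =>
    if PySem.List.pyGetD array idx 0 ≠ PySem.List.pyGetD array (idx - 1) 0 then
      (s.1 + 1, s.2)
    else
      (1, max s.2 s.1)

def pvFB (array : List Int) : List Int → Int → List Int :=
  fun acc i =>
    if PySem.List.pyGetD array i 0 = PySem.List.pyGetD array (i - 1) 0 then acc ++ [i] else acc

-- loop invariant: after processing indices 1..m-1, A's state is
-- (m - last cut, max gap among completed segments) and B's cuts list is nonempty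
theorem pv_inv (array : List Int) (j : Nat) :
    let m : Int := 1 + (j : Int)
    let sA := (PySem.List.pyRange 1 m 1).foldl (pvFA array) (1, 0)
    let cB := (PySem.List.pyRange 1 m 1).foldl (pvFB array) [0]
    cB ≠ [] ∧ sA.1 = m - cB.getLastD 0 ∧ sA.2 = pvGmax cB := by
  induction j with
  | zero =>
    simp only
    rw [PySem.List.pyRange_one_eq_nil (by omega)]
    refine ⟨by simp, by simp, ?_⟩
    simp [pvGmax, pvZipAdj]
  | succ k ih =>
    simp only at ih ⊢
    have hsplit : PySem.List.pyRange 1 (1 + ((k : Int) + 1)) 1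
        = PySem.List.pyRange 1 (1 + (k : Int)) 1 ++ [1 + (k : Int)] := by
      have h1 : (1 : Int) + ((k : Int) + 1) = (1 + (k : Int)) + 1 := by ring
      rw [h1, PySem.List.pyRange_one_succ_right (by omega)]
    obtain ⟨hne, h1, h2⟩ := ih
    push_cast
    rw [hsplit, List.foldl_append, List.foldl_append]
    simp only [List.foldl]
    by_cases hEq : PySem.List.pyGetD array (1 + (k : Int)) 0
        = PySem.List.pyGetD array (1 + (k : Int) - 1) 0
    · -- break at index 1+k: A resets, B records the cut
      simp only [pvFA, pvFB, if_pos hEq, ne_eq, if_neg (not_not_intro hEq)]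
      refine ⟨by simp, ?_, ?_⟩
      · rw [List.getLastD_concat]
        omega
      · rw [pvGmax_append _ hne, h1, h2]
    · -- adjacent elements differ: A extends the run, B's cuts unchanged
      simp only [pvFA, pvFB, if_neg hEq, ne_eq, if_pos hEq]
      exact ⟨hne, by omega, h2⟩

-- ===== VERDICT (by name: the statement is the Claim_ definition above) =====
theorem alternativeSequence_spec : Claim_equal_alternativeSequence := by
  unfold Claim_equal_alternativeSequence
  intro array _
  unfold Spec_alternativeSequence alternativeSequence alternativeSequence_alt
  cases array with
  | nil => decide
  | cons a t =>
    have hlen0 : (a :: t).length ≠ 0 := by simp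
    rw [if_neg hlen0]
    have hlen : (1 : Int) + (t.length : Int) = ((a :: t).length : Int) := by
      simp; ring
    have hinv := pv_inv (a :: t) t.length
    simp only at hinv
    rw [hlen] at hinv
    obtain ⟨hne, h1, h2⟩ := hinv
    show max (((PySem.List.pyRange 1 ((a :: t).length : Int) 1).foldl (pvFA (a :: t)) (1, 0)).2)
        (((PySem.List.pyRange 1 ((a :: t).length : Int) 1).foldl (pvFA (a :: t)) (1, 0)).1)
      = pvGmax (((PySem.List.pyRange 1 ((a :: t).length : Int) 1).foldl (pvFB (a :: t)) [0]) ++ [((a :: t).length : Int)])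
    rw [pvGmax_append _ hne, h1, h2]
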